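-- pv_equiv track=rewrite | github.com/Konomaster/TCC | faqir/utils.py | bps_scale
-- ===== SOURCE A (Python) =====
-- def bps_scale(bps):
--     result_string = str(bps)
--     i = 0
--     unit = -1
--     point = 0
--     while i < len(result_string):
--         if i % 3 == 0 and unit < 8:
--             unit += 1
--             point = i
--         i += 1
--     if point > 2:
--         result_string = result_string[:len(result_string) - point] + "." + result_string[
--                                                                            len(result_string) - point:]
--     if unit < 1:
--         result_string = result_string + " bits/s"
--     elif unit == 1:
--         result_string = result_string + " Kbits/s"
--     elif unit == 2:
--         result_string = result_string + " Mbits/s"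
--     elif unit == 3:
--         result_string = result_string + " Gbits/s"
--     elif unit == 4:
--         result_string = result_string + " Tbits/s"
--     elif unit == 5:
--         result_string = result_string + " Pbits/s"
--     elif unit == 6:
--         result_string = result_string + " Ebits/s"
--     elif unit == 7:
--         result_string = result_string + " Zbits/s"
--     elif unit == 8:
--         result_string = result_string + " Ybits/s"
--
--     return result_string
-- ===== SOURCE B (Python) =====
-- UNITS = [" bits/s", " Kbits/s", " Mbits/s", " Gbits/s", " Tbits/s",
--          " Pbits/s", " Ebits/s", " Zbits/s", " Ybits/s"]
--
--
-- def bps_scale(bps):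
--     s = str(bps)
--     n = len(s)
--     unit = min(8, (n - 1) // 3)
--     point = 3 * unit
--     if point > 2:
--         s = s[:n - point] + "." + s[n - point:]
--     return s + UNITS[unit]
-- ===== Notes on version B (the rewrite author's own statement) =====
-- stated objective: simpler
-- what changed: Replaces the digit-counting while loop and the nine-way elif chain by a closed-form arithmetic computation of the unit index and decimal-point offset plus a single indexed lookup into a suffix table.
import Mathlib
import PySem

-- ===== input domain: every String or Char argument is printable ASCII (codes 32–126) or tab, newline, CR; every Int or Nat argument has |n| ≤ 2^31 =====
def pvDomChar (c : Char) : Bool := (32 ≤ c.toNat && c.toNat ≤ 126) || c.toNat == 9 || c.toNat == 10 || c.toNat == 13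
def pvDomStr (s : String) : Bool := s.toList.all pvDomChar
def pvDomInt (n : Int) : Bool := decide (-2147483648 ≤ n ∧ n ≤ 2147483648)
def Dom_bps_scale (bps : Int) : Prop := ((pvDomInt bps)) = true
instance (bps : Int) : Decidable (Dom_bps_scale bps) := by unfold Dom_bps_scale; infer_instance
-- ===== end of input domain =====

-- B replaces A's digit-by-digit while loop and nine-branch elif chain by closed-form
-- arithmetic (unit = min 8 ((n-1)//3), point = 3*unit) and one table lookup (objective: simpler).

-- ===== PORT A =====
-- the while loop of A: r = remaining iterations (len - i), state (unit, point)
def bpsLoopA (r i : Nat) (unit : Int) (point : Nat) : Int × Nat :=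
  match r with
  | 0 => (unit, point)
  | Nat.succ r' =>
    if i % 3 = 0 ∧ unit < 8 then bpsLoopA r' (i + 1) (unit + 1) i
    else bpsLoopA r' (i + 1) unit point

def bps_scale (bps : Int) : String :=
  let cs := PySem.Int.toChars bps
  let up := bpsLoopA cs.length 0 (-1) 0
  let unit := up.1
  let point := up.2
  let cs2 :=
    if (point : Int) > 2 then
      PySem.List.slice cs none (some ((cs.length : Int) - (point : Int))) ++ ['.'] ++
        PySem.List.slice cs (some ((cs.length : Int) - (point : Int))) none
    else cs
  let cs3 :=
    if unit < 1 then cs2 ++ " bits/s".toList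
    else if unit = 1 then cs2 ++ " Kbits/s".toList
    else if unit = 2 then cs2 ++ " Mbits/s".toList
    else if unit = 3 then cs2 ++ " Gbits/s".toList
    else if unit = 4 then cs2 ++ " Tbits/s".toList
    else if unit = 5 then cs2 ++ " Pbits/s".toList
    else if unit = 6 then cs2 ++ " Ebits/s".toList
    else if unit = 7 then cs2 ++ " Zbits/s".toList
    else if unit = 8 then cs2 ++ " Ybits/s".toList
    else cs2
  String.ofList cs3

-- ===== PORT B =====
def pvUnits : List String :=
  [" bits/s", " Kbits/s", " Mbits/s", " Gbits/s", " Tbits/s",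
   " Pbits/s", " Ebits/s", " Zbits/s", " Ybits/s"]

def bps_scale_alt (bps : Int) : String :=
  let cs := PySem.Int.toChars bps
  let n := cs.length
  let unit := min 8 ((n - 1) / 3)   -- n ≥ 1, so Nat arithmetic agrees with Python's //
  let point := 3 * unit
  -- s[:n-point] / s[n-point:] with a nonnegative index: drop/take are exact here
  let cs2 := if point > 2 then cs.take (n - point) ++ ['.'] ++ cs.drop (n - point) else cs
  String.ofList (cs2 ++ ((PySem.List.pyGet? pvUnits (unit : Int)).getD "").toList)

-- ===== PRECONDITION & SPEC =====
def Spec_bps_scale (bps : Int) (out : String) : Prop := out = bps_scale_alt bps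
instance (bps : Int) (out : String) : Decidable (Spec_bps_scale bps out) := by unfold Spec_bps_scale; infer_instance

-- ===== CLAIM (what is proved, stated in full; the proofs are below) =====
def Claim_equal_bps_scale : Prop := ∀ (bps : Int), Dom_bps_scale bps → Spec_bps_scale bps (bps_scale bps)

-- ===== LEMMAS AND PROOFS =====

-- invariant characterisation of A's while loop from i ≥ 1 onwards
theorem bpsLoopA_char (r : Nat) : ∀ (i : Nat), 1 ≤ i →
    bpsLoopA r i ((min 8 ((i - 1) / 3) : Nat) : Int) (3 * min 8 ((i - 1) / 3))
      = (((min 8 ((i + r - 1) / 3) : Nat) : Int), 3 * min 8 ((i + r - 1) / 3)) := by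
  induction r with
  | zero => intro i hi; simp [bpsLoopA]
  | succ r' ih =>
    intro i hi
    by_cases h : i % 3 = 0 ∧ min 8 ((i - 1) / 3) < 8
    · have h1 : ((min 8 ((i - 1) / 3) : Nat) : Int) + 1 = ((min 8 ((i + 1 - 1) / 3) : Nat) : Int) := by
        have hx : min 8 ((i - 1) / 3) + 1 = min 8 ((i + 1 - 1) / 3) := by omega
        exact_mod_cast congrArg (Nat.cast : Nat → Int) hx
      have h2 : i = 3 * min 8 ((i + 1 - 1) / 3) := by omega
      have hc : i % 3 = 0 ∧ ((min 8 ((i - 1) / 3) : Nat) : Int) < 8 :=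
        ⟨h.1, by exact_mod_cast h.2⟩
      rw [bpsLoopA, if_pos hc, h1]
      have hgoal := ih (i + 1) (by omega)
      rw [← h2] at hgoal
      rw [hgoal]
      congr 2 <;> omega
    · have hc : ¬ (i % 3 = 0 ∧ ((min 8 ((i - 1) / 3) : Nat) : Int) < 8) := by
        intro hx; exact h ⟨hx.1, by exact_mod_cast hx.2⟩
      have h1 : min 8 ((i - 1) / 3) = min 8 ((i + 1 - 1) / 3) := by omega
      rw [bpsLoopA, if_neg hc, h1]
      rw [ih (i + 1) (by omega)]
      congr 2 <;> omega

theorem bpsLoopA_run (n : Nat) (hn : 1 ≤ n) :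
    bpsLoopA n 0 (-1) 0
      = (((min 8 ((n - 1) / 3) : Nat) : Int), 3 * min 8 ((n - 1) / 3)) := by
  obtain ⟨m, rfl⟩ : ∃ m, n = m + 1 := ⟨n - 1, by omega⟩
  rw [bpsLoopA, if_pos (by norm_num)]
  have := bpsLoopA_char m 1 (le_refl 1)
  simpa using this

-- the nine-branch elif chain of A equals B's table lookup, for every unit value 0..8
theorem chain_eq_lookup (cs2 : List Char) (u : Nat) (hu : u ≤ 8) :
    (if ((u : Nat) : Int) < 1 then cs2 ++ " bits/s".toList
     else if ((u : Nat) : Int) = 1 then cs2 ++ " Kbits/s".toList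
     else if ((u : Nat) : Int) = 2 then cs2 ++ " Mbits/s".toList
     else if ((u : Nat) : Int) = 3 then cs2 ++ " Gbits/s".toList
     else if ((u : Nat) : Int) = 4 then cs2 ++ " Tbits/s".toList
     else if ((u : Nat) : Int) = 5 then cs2 ++ " Pbits/s".toList
     else if ((u : Nat) : Int) = 6 then cs2 ++ " Ebits/s".toList
     else if ((u : Nat) : Int) = 7 then cs2 ++ " Zbits/s".toList
     else if ((u : Nat) : Int) = 8 then cs2 ++ " Ybits/s".toList
     else cs2)
      = cs2 ++ ((PySem.List.pyGet? pvUnits ((u : Nat) : Int)).getD "").toList := by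
  interval_cases u <;> norm_num [pvUnits, PySem.List.pyGet?, PySem.List.pyIdx?] <;> decide

theorem toDigitsCore_len_ge (b : Nat) :
    ∀ (f n : Nat) (ds : List Char), ds.length ≤ (Nat.toDigitsCore b f n ds).length := by
  intro f
  induction f with
  | zero => intro n ds; simp [Nat.toDigitsCore]
  | succ f ih =>
    intro n ds
    rw [Nat.toDigitsCore]
    split
    · simp
    · exact le_trans (by simp) (ih (n / b) (Nat.digitChar (n % b) :: ds))

theorem toDigits_ne_nil (n : Nat) : Nat.toDigits 10 n ≠ [] := by
  intro h
  have h1 := toDigitsCore_len_ge 10 n (n / 10) (Nat.digitChar (n % 10) :: [])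
  rw [Nat.toDigits, Nat.toDigitsCore] at h
  split at h
  · exact absurd h (by simp)
  · rw [h] at h1
    simp at h1

theorem toChars_length_pos (bps : Int) : 1 ≤ (PySem.Int.toChars bps).length := by
  unfold PySem.Int.toChars
  split
  · simp
  · have h := toDigits_ne_nil bps.toNat
    cases hh : Nat.toDigits 10 bps.toNat with
    | nil => exact absurd hh h
    | cons a l => simp

-- ===== VERDICT (by name: the statement is the Claim_ definition above) =====
theorem bps_scale_spec : Claim_equal_bps_scale := by
  intro bps _
  have hn : 1 ≤ (PySem.Int.toChars bps).length := toChars_length_pos bps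
  simp only [Spec_bps_scale, bps_scale, bps_scale_alt]
  rw [bpsLoopA_run _ hn]
  set cs := PySem.Int.toChars bps with hcs
  set u := min 8 ((cs.length - 1) / 3) with hu
  have hn' : 1 ≤ cs.length := hn
  have hu8 : u ≤ 8 := by omega
  have hpn : 3 * u ≤ cs.length - 1 := by omega
  have hslice1 : PySem.List.slice cs none (some ((cs.length : Int) - ((3 * u : Nat) : Int)))
      = cs.take (cs.length - 3 * u) := by
    have h : ((cs.length : Int) - ((3 * u : Nat) : Int)) = ((cs.length - 3 * u : Nat) : Int) := by
      push_cast; omega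
    rw [h, PySem.List.slice_to_natCast]
  have hslice2 : PySem.List.slice cs (some ((cs.length : Int) - ((3 * u : Nat) : Int))) none
      = cs.drop (cs.length - 3 * u) := by
    have h : ((cs.length : Int) - ((3 * u : Nat) : Int)) = ((cs.length - 3 * u : Nat) : Int) := by
      push_cast; omega
    rw [h, PySem.List.slice_from_natCast]
  have hcond : (((3 * u : Nat) : Int) > 2) ↔ (3 * u > 2) := by
    constructor <;> intro <;> omega
  simp only [hcond, hslice1, hslice2]
  rw [chain_eq_lookup _ u hu8]
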